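-- pv_equiv track=rewrite | github.com/joshanashakya/dissertation | workspace/dataset/java-python/GeeksForGeeks/2890/A/2.py | findNthEvenDigitNumber
-- ===== SOURCE A (Python) =====
-- def findNthEvenDigitNumber(n):
--
--     # variable to note how many such
--     # numbers have been found till now
--     count = 0;
--     i = 0;
--     while (True):
--
--         curr = i;
--
--         # bool variable to check if
--         # 1, 3, 5, 7, 9 is there or not
--         isCurrEvenDigit = True;
--
--         # checking each digit of the number
--         while (curr != 0):
--
--             # If 1, 3, 5, 7, 9 is found
--             # temp is changed to false
--             if (curr % 10 == 1 or curr % 10 == 3 or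
--                 curr % 10 == 5 or curr % 10 == 7 or
--                 curr % 10 == 9):
--                 isCurrEvenDigit = False;
--             curr = curr // 10;
--
--         # temp is true it means that it
--         # does not have 1, 3, 5, 7, 9
--         if (isCurrEvenDigit == True):
--             count += 1;
--
--         # If nth such number is found,
--         # return it
--         if (count == n):
--             return i;
--
--         i += 1;
-- ===== SOURCE B (Python) =====
-- def findNthEvenDigitNumber(n):
--     # base-5 digits of n-1, least significant first
--     m = n - 1
--     digits = []
--     while m > 0:
--         digits.append(m % 5)
--         m //= 5
--     # read them back most-significant first, doubling each digit
--     res = 0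
--     for d in reversed(digits):
--         res = res * 10 + 2 * d
--     return res
-- ===== Notes on version B (the rewrite author's own statement) =====
-- stated objective: faster
-- what changed: A scans every integer from 0 upward, testing each digit of each candidate until the nth all-even-digit number is found; B computes the answer directly by writing n-1 in base 5 and doubling each digit (the all-even-digit numbers in order are exactly the base-5 numerals with digits doubled).
import Mathlib
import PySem

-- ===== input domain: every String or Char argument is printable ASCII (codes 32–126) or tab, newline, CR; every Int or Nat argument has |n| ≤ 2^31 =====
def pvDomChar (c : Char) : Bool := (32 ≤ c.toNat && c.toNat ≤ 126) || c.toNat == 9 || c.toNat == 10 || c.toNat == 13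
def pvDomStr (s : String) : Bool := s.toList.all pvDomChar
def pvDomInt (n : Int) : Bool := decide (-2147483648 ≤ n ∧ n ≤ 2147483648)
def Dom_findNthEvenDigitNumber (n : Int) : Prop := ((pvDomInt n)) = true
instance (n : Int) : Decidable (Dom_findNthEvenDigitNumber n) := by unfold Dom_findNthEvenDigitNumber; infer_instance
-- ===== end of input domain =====

-- B replaces A's scan over all numbers (testing every digit of every candidate) by writing
-- n-1 in base 5 and doubling each digit; measurably faster (asymptotic: O(log n) vs O(answer·digits)).

-- ===== PORT A =====
-- inner `while (curr != 0)` loop of A; `curr` is always ≥ 0 in A (i starts at 0 and only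
-- increases), so the state is a Nat and Python's % and // agree with Nat.mod / Nat.div here
def aInner : Nat → Bool → Bool
  | 0, flag => flag
  | (k+1), flag =>
      aInner ((k+1) / 10)
        (if (k+1) % 10 = 1 ∨ (k+1) % 10 = 3 ∨ (k+1) % 10 = 5 ∨ (k+1) % 10 = 7 ∨ (k+1) % 10 = 9
         then false else flag)
  decreasing_by exact Nat.div_lt_self (Nat.succ_pos k) (by norm_num)

-- outer `while (True)` loop of A; the fuel argument is ONLY a totality guard (the loop has no
-- bound in Python); under Pre_ the fuel below is proved sufficient, so the 0-case is unreachable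
def aLoop : Nat → Int → Nat → Nat → Int
  | 0, _, _, i => (i : Int)
  | (fuel+1), n, count, i =>
      -- `if isCurrEvenDigit: count += 1` then `if count == n: return i` else continue
      if ((if aInner i true then count + 1 else count : Nat) : Int) = n then (i : Int)
      else aLoop fuel n (if aInner i true then count + 1 else count) (i + 1)

def findNthEvenDigitNumber (n : Int) : Int :=
  aLoop (14 * n.toNat * n.toNat + 2) n 0 0

-- ===== PORT B =====
-- `while m > 0: digits.append(m % 5); m //= 5` — all values stay ≥ 0, so Nat is exact
def bDigits : Nat → List Nat
  | 0 => []
  | (m+1) => (m+1) % 5 :: bDigits ((m+1) / 5)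
  decreasing_by exact Nat.div_lt_self (Nat.succ_pos m) (by norm_num)

-- `for d in reversed(digits): res = res * 10 + 2 * d`
def findNthEvenDigitNumber_alt (n : Int) : Int :=
  (((bDigits (n - 1).toNat).reverse.foldl (fun res d => res * 10 + 2 * d) 0 : Nat) : Int)

-- ===== PRECONDITION & SPEC =====
-- A's while-loop never terminates for n ≤ 0 (count only grows past every value ≥ 1), so A
-- returns exactly on n ≥ 1; Pre_ excludes only the diverging inputs.
def Pre_findNthEvenDigitNumber (n : Int) : Prop := 1 ≤ n
instance (n : Int) : Decidable (Pre_findNthEvenDigitNumber n) := by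
  unfold Pre_findNthEvenDigitNumber; infer_instance

def pvWitness_findNthEvenDigitNumber : Int := 1

def Spec_findNthEvenDigitNumber (n : Int) (out : Int) : Prop := out = findNthEvenDigitNumber_alt n
instance (n : Int) (out : Int) : Decidable (Spec_findNthEvenDigitNumber n out) := by
  unfold Spec_findNthEvenDigitNumber; infer_instance

-- ===== CLAIM (what is proved, stated in full; the proofs are below) =====
def Claim_equal_findNthEvenDigitNumber : Prop :=
  ∀ (n : Int), Dom_findNthEvenDigitNumber n → Pre_findNthEvenDigitNumber n →
    Spec_findNthEvenDigitNumber n (findNthEvenDigitNumber n)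

-- ===== LEMMAS AND PROOFS =====

-- the value B computes from m : the base-5 digits of m read in base 10, doubled
def F (m : Nat) : Nat := (bDigits m).reverse.foldl (fun res d => res * 10 + 2 * d) 0

theorem F_zero : F 0 = 0 := by simp [F, bDigits]

theorem F_rec (m : Nat) (h : 0 < m) : F m = F (m / 5) * 10 + 2 * (m % 5) := by
  obtain ⟨k, rfl⟩ : ∃ k, m = k + 1 := ⟨m - 1, by omega⟩
  simp [F, bDigits, List.foldl_append]

theorem F_lt_succ : ∀ m, F m < F (m + 1) := by
  intro m
  induction m using Nat.strong_induction_on with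
  | _ m ih =>
    rcases Nat.eq_zero_or_pos m with rfl | hm
    · simp [F_zero]; rw [F_rec 1 (by norm_num)]; norm_num [F_zero]
    rcases Nat.eq_zero_or_pos ((m+1) % 5) with hr | hr
    · -- m+1 = 5a, so m has last base-5 digit 4 and quotient a-1
      have h1 := F_rec (m+1) (by omega)
      have h2 := F_rec m hm
      have e1 : m / 5 = (m+1)/5 - 1 := by omega
      have e2 : m % 5 = 4 := by omega
      rw [e1, e2] at h2
      have hih : F ((m+1)/5 - 1) < F ((m+1)/5 - 1 + 1) := ih _ (by omega)
      have e3 : (m+1)/5 - 1 + 1 = (m+1)/5 := by omega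
      rw [e3] at hih
      omega
    · have h1 : F (m+1) = F ((m+1)/5) * 10 + 2 * ((m+1) % 5) := F_rec (m+1) (by omega)
      have h2 : F m = F (m/5) * 10 + 2 * (m % 5) := F_rec m hm
      have e1 : m / 5 = (m+1) / 5 := by omega
      have e2 : m % 5 = (m+1) % 5 - 1 := by omega
      rw [e1, e2] at h2
      omega

theorem F_mono : StrictMono F := strictMono_nat_of_lt_succ F_lt_succ

theorem F_le {a b : Nat} (h : a ≤ b) : F a ≤ F b := F_mono.le_iff_le.mpr h

theorem aInner_false : ∀ k, aInner k false = false := by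
  intro k
  induction k using Nat.strong_induction_on with
  | _ k ih =>
    match k with
    | 0 => simp [aInner]
    | (j+1) =>
      rw [aInner]
      split
      · exact ih _ (Nat.div_lt_self (Nat.succ_pos j) (by norm_num))
      · exact ih _ (Nat.div_lt_self (Nat.succ_pos j) (by norm_num))

theorem aInner_succ_iff (j : Nat) :
    aInner (j+1) true = true ↔ (j+1) % 10 % 2 = 0 ∧ aInner ((j+1)/10) true = true := by
  rw [aInner]
  split
  · rename_i h
    rw [aInner_false]
    constructor
    · intro h'; exact absurd h' (by simp)
    · intro ⟨he, _⟩; omega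
  · rename_i h
    constructor
    · intro h'; exact ⟨by omega, h'⟩
    · intro ⟨_, h'⟩; exact h'

theorem exists_of_aInner : ∀ i, aInner i true = true → ∃ m, F m = i := by
  intro i
  induction i using Nat.strong_induction_on with
  | _ i ih =>
    match i with
    | 0 => intro _; exact ⟨0, F_zero⟩
    | (j+1) =>
      intro h
      obtain ⟨heven, hrec⟩ := (aInner_succ_iff j).mp h
      obtain ⟨a, ha⟩ := ih ((j+1)/10) (Nat.div_lt_self (Nat.succ_pos j) (by norm_num)) hrec
      refine ⟨5 * a + (j+1) % 10 / 2, ?_⟩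
      have hpos : 0 < 5 * a + (j+1) % 10 / 2 := by
        rcases Nat.eq_zero_or_pos (5 * a + (j+1) % 10 / 2) with hz | hp
        · exfalso
          have ha0 : a = 0 := by omega
          have hr0 : (j+1) % 10 = 0 := by omega
          rw [ha0, F_zero] at ha
          omega
        · exact hp
      rw [F_rec _ hpos]
      have e1 : (5 * a + (j+1) % 10 / 2) / 5 = a := by omega
      have e2 : (5 * a + (j+1) % 10 / 2) % 5 = (j+1) % 10 / 2 := by omega
      rw [e1, e2, ha]
      omega

theorem aInner_F : ∀ m, aInner (F m) true = true := by
  intro m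
  induction m using Nat.strong_induction_on with
  | _ m ih =>
    rcases Nat.eq_zero_or_pos m with rfl | hm
    · rw [F_zero]; simp [aInner]
    have hF : F m = F (m/5) * 10 + 2 * (m % 5) := F_rec m hm
    rcases Nat.eq_zero_or_pos (F m) with hz | hp
    · rw [hz]; simp [aInner]
    obtain ⟨j, hj⟩ : ∃ j, F m = j + 1 := ⟨F m - 1, by omega⟩
    rw [hj]
    rw [aInner_succ_iff]
    have e1 : (j+1) % 10 = 2 * (m % 5) := by omega
    have e2 : (j+1) / 10 = F (m/5) := by omega
    refine ⟨by omega, ?_⟩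
    rw [e2]
    exact ih (m/5) (Nat.div_lt_self hm (by norm_num))

theorem aInner_iff (i : Nat) : aInner i true = true ↔ ∃ m, F m = i := by
  constructor
  · exact exists_of_aInner i
  · rintro ⟨m, rfl⟩; exact aInner_F m

theorem F_bound : ∀ m, F m ≤ 14 * (m * m) := by
  intro m
  induction m using Nat.strong_induction_on with
  | _ m ih =>
    rcases Nat.eq_zero_or_pos m with rfl | hm
    · simp [F_zero]
    have hF : F m = F (m/5) * 10 + 2 * (m % 5) := F_rec m hm
    have h1 : 1 ≤ m * m := Nat.mul_le_mul hm hm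
    rcases Nat.eq_zero_or_pos (m/5) with hq | hq
    · rw [hq, F_zero] at hF; omega
    have hih : F (m/5) ≤ 14 * (m/5 * (m/5)) := ih (m/5) (Nat.div_lt_self hm (by norm_num))
    have h5 : 5 * (m/5) ≤ m := by omega
    have h25 : 25 * (m/5 * (m/5)) ≤ m * m := by
      calc 25 * (m/5 * (m/5)) = (5 * (m/5)) * (5 * (m/5)) := by ring
        _ ≤ m * m := Nat.mul_le_mul h5 h5
    have hr : m % 5 ≤ 4 := by omega
    omega

theorem aLoop_eq (N : Nat) (hN : 1 ≤ N) :
    ∀ fuel c i, c < N → i ≤ F c → (∀ m, m < c → F m < i) →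
      F (N-1) + 1 ≤ i + fuel → aLoop fuel (N : Int) c i = (F (N-1) : Int) := by
  intro fuel
  induction fuel with
  | zero =>
    intro c i hc hi _ hfuel
    exfalso
    have : F c ≤ F (N-1) := F_le (by omega)
    omega
  | succ fuel ihf =>
    intro c i hc hi hlt hfuel
    rw [aLoop]
    have hEiff : aInner i true = true ↔ i = F c := by
      rw [aInner_iff]
      constructor
      · rintro ⟨m, rfl⟩
        rcases lt_trichotomy m c with h | h | h
        · exact absurd (hlt m h) (by omega)
        · rw [h]
        · have := F_mono h; omega
      · intro h; exact ⟨c, h.symm⟩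
    by_cases hE : i = F c
    · have hEt : aInner i true = true := hEiff.mpr hE
      simp only [hEt, if_true]
      by_cases hdone : c + 1 = N
      · have hc1 : (((c + 1 : Nat)) : Int) = (N : Int) := by omega
        rw [if_pos hc1]
        have : c = N - 1 := by omega
        rw [hE, this]
      · have hne : (((c + 1 : Nat)) : Int) ≠ (N : Int) := by omega
        rw [if_neg hne]
        apply ihf (c+1) (i+1) (by omega)
        · have := F_lt_succ c; omega
        · intro m hm
          rcases Nat.lt_succ_iff_lt_or_eq.mp hm with h | rfl
          · have := hlt m h; omega
          · omega
        · omega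
    · have hEf : aInner i true = false := by
        rcases Bool.eq_false_or_eq_true (aInner i true) with h | h
        · exact absurd (hEiff.mp h) hE
        · exact h
      simp only [hEf, Bool.false_eq_true, if_false]
      have hne : (((c : Nat)) : Int) ≠ (N : Int) := by omega
      rw [if_neg hne]
      apply ihf c (i+1) hc
      · have : i < F c := by omega
        omega
      · intro m hm; have := hlt m hm; omega
      · omega

-- ===== VERDICT (by name: the statement is the Claim_ definition above) =====
theorem findNthEvenDigitNumber_spec : Claim_equal_findNthEvenDigitNumber := by
  intro n _ hpre
  unfold Spec_findNthEvenDigitNumber findNthEvenDigitNumber findNthEvenDigitNumber_alt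
  have hpre' : 1 ≤ n := hpre
  set N := n.toNat with hNdef
  have hN : 1 ≤ N := by omega
  have hn : n = (N : Int) := by omega
  have hfuel : F (N-1) + 1 ≤ 0 + (14 * N * N + 2) := by
    have hb := F_bound (N-1)
    have hle : (N-1) * (N-1) ≤ N * N := Nat.mul_le_mul (by omega) (by omega)
    have : 14 * N * N = 14 * (N * N) := by ring
    omega
  have hmain := aLoop_eq N hN (14 * N * N + 2) 0 0 hN (by rw [F_zero]) (by omega) hfuel
  rw [hn]
  have hn1 : ((N : Int) - 1).toNat = N - 1 := by omega
  rw [hn1, hmain]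
  rfl
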